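-- pv_equiv track=rewrite | github.com/kohbwoo/Programmers | Level 3/12987.py | solution
-- ===== SOURCE A (Python) =====
-- def solution(A, B):
--     answer = 0
--     while len(A) > 0:
--         if min(B) < min(A):
--             Am = max(A)
--             Bm = min(B)
--             A.remove(Am)
--             B.remove(Bm)
--         else:
--             Am = min(A)
--             Bm = min(B)
--             A.remove(Am)
--             B.remove(Bm)
--             answer = answer + 1
--
--
--     return answer
-- ===== SOURCE B (Python) =====
-- def solution(A, B):
--     # Sort once, then one pass: the loop of A always consumes min(B), so the
--     # len(A) smallest elements of B are compared in increasing order against the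
--     # current minimum of what is left of A; discarded maxima never affect that
--     # minimum, so a single front pointer over sorted(A) suffices.
--     rest = sorted(A)
--     ans = 0
--     for b in sorted(B)[:len(A)]:
--         if rest and b >= rest[0]:
--             rest = rest[1:]
--             ans += 1
--     return ans
-- ===== Notes on version B (the rewrite author's own statement) =====
-- stated objective: faster
-- what changed: Replaced the while-loop's repeated min/max scans and list removals by sorting both lists once and a single front-pointer pass over the len(A) smallest elements of B.
import Mathlib
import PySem

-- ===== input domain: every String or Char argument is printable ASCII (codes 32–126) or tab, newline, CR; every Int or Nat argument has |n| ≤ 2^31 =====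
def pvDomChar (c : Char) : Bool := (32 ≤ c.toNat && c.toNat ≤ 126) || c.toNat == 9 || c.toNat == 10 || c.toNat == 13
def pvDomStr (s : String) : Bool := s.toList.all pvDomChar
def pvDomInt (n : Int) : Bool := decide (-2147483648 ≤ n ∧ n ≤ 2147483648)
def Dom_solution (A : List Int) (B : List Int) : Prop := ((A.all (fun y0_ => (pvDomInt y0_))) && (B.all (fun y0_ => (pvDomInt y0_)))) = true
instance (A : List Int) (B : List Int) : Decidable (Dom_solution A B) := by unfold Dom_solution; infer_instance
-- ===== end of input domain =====

-- B replaces A's repeated min/max/remove scans by sorting both lists once and a single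
-- front-pointer pass (objective: faster). Python A mutates its arguments in place
-- (A.remove/B.remove empty them); B does not — the equivalence here is about the RETURN value.

-- ===== PORT A =====
-- the while-loop of A: each iteration removes one element of A, so A.length is enough fuel
def solutionGo : Nat → List Int → List Int → Int → Int
  | 0, _, _, answer => answer
  | fuel + 1, A, B, answer =>
    if 0 < A.length then
      match PySem.List.min? B (fun x => x), PySem.List.min? A (fun x => x) with
      | some bm, some am =>
        if bm < am then
          match PySem.List.max? A (fun x => x) with
          | some aM => solutionGo fuel ((PySem.List.remove? A aM).getD A) ((PySem.List.remove? B bm).getD B) answer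
          | none => answer   -- unreachable: A is nonempty here
        else solutionGo fuel ((PySem.List.remove? A am).getD A) ((PySem.List.remove? B bm).getD B) (answer + 1)
      | _, _ => answer   -- min(B) on empty B: Python raises ValueError (excluded by Pre_)
    else answer

def solution (A : List Int) (B : List Int) : Int := solutionGo A.length A B 0

-- ===== PORT B =====
-- one loop step of Source B: 'if rest and b >= rest[0]: rest = rest[1:]; ans += 1'
def altStep (s : List Int × Int) (b : Int) : List Int × Int :=
  match s.1 with
  | [] => s
  | r :: rs => if r ≤ b then (rs, s.2 + 1) else s

-- sorted(B)[:len(A)] is ported as PySem.List.slice (exact for Python's slice)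
def solution_alt (A : List Int) (B : List Int) : Int :=
  ((PySem.List.slice (PySem.List.sorted B (fun x => x)) none (some (A.length : Int))).foldl
      altStep (PySem.List.sorted A (fun x => x), 0)).2

-- ===== PRECONDITION & SPEC =====
-- Pre_ excludes exactly the inputs where Python A raises: min(B) on an emptied B,
-- i.e. len(B) < len(A).
def Pre_solution (A : List Int) (B : List Int) : Prop := A.length ≤ B.length
instance (A : List Int) (B : List Int) : Decidable (Pre_solution A B) := by unfold Pre_solution; infer_instance
def pvWitness_solution : List Int × List Int := ([1, 5], [0, 3])

def Spec_solution (A : List Int) (B : List Int) (out : Int) : Prop := out = solution_alt A B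
instance (A : List Int) (B : List Int) (out : Int) : Decidable (Spec_solution A B out) := by unfold Spec_solution; infer_instance

-- ===== CLAIM (what is proved, stated in full; the proofs are below) =====
def Claim_equal_solution : Prop := ∀ (A : List Int) (B : List Int), Dom_solution A B → Pre_solution A B → Spec_solution A B (solution A B)

-- ===== LEMMAS AND PROOFS =====

-- sorted(A) decomposes as min(A) followed by sorted(A with that min removed)
lemma sorted_min_cons (A : List Int) (m : Int)
    (h : PySem.List.min? A (fun x => x) = some m) :
    PySem.List.sorted A (fun x => x) = m :: PySem.List.sorted (A.erase m) (fun x => x) := by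
  cases hsa : PySem.List.sorted A (fun x => x) with
  | nil =>
      rw [PySem.List.sorted_eq_nil_iff] at hsa
      rw [hsa] at h
      rw [(PySem.List.min?_eq_none_iff ([] : List Int) (fun x => x)).mpr rfl] at h
      cases h
  | cons h0 t =>
      have hh0A : h0 ∈ A := by
        rw [← PySem.List.mem_sorted A (fun x => x) false]; rw [hsa]; exact List.mem_cons_self
      have h0m : h0 = m := by
        have h1 := PySem.List.key_head_sorted_le A (fun x => x) hsa m (PySem.List.min?_mem h)
        have h2 := PySem.List.min?_isMin h h0 hh0A
        simp only at h1 h2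
        omega
      have hperm : t.Perm (A.erase m) := by
        have hp : (m :: t).Perm A := by
          have := PySem.List.sorted_perm A (fun x => x) false
          rw [hsa, h0m] at this; exact this
        have := hp.erase m
        rwa [List.erase_cons_head] at this
      have hpw : List.Pairwise (fun a b : Int => a ≤ b) t := by
        have := PySem.List.sorted_pairwise A (fun x : Int => x)
        rw [hsa] at this; exact this.of_cons
      rw [h0m, PySem.List.sorted_id_eq_of_perm_of_pairwise (A.erase m) t hperm hpw]

-- sorted(A) decomposes as sorted(A with max removed) followed by max(A)
lemma sorted_max_concat (A : List Int) (M : Int)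
    (h : PySem.List.max? A (fun x => x) = some M) :
    PySem.List.sorted A (fun x => x) = PySem.List.sorted (A.erase M) (fun x => x) ++ [M] := by
  rcases List.eq_nil_or_concat (PySem.List.sorted A (fun x => x)) with hsa | ⟨ys, L, hsa⟩
  · rw [PySem.List.sorted_eq_nil_iff] at hsa
    rw [hsa] at h
    rw [(PySem.List.max?_eq_none_iff ([] : List Int) (fun x => x)).mpr rfl] at h
    cases h
  all_goals rw [List.concat_eq_append] at hsa
  · have hpwa := PySem.List.sorted_pairwise A (fun x : Int => x)
    rw [hsa, List.pairwise_append] at hpwa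
    have hLA : L ∈ A := by
      rw [← PySem.List.mem_sorted A (fun x => x) false]; rw [hsa]; simp
    have hLM : L = M := by
      have h1 := PySem.List.max?_isMax h L hLA
      have h2 : M ≤ L := by
        have hMsa : M ∈ ys ++ [L] := by
          rw [← hsa, PySem.List.mem_sorted]; exact PySem.List.max?_mem h
        rcases List.mem_append.mp hMsa with hMy | hML
        · exact hpwa.2.2 M hMy L (by simp)
        · simp at hML; omega
      omega
    have hperm : ys.Perm (A.erase M) := by
      have hp : (ys ++ [L]).Perm A := by rw [← hsa]; exact PySem.List.sorted_perm A (fun x => x) false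
      have hp2 : ((ys ++ [L]).erase M).Perm (A.erase M) := hp.erase M
      have hp3 : ((L :: ys).erase M).Perm ((ys ++ [L]).erase M) :=
        ((List.perm_append_singleton L ys).symm.erase M)
      have : ((L :: ys).erase M) = ys := by rw [hLM, List.erase_cons_head]
      exact (this ▸ hp3).trans hp2
    rw [hsa, hLM, PySem.List.sorted_id_eq_of_perm_of_pairwise (A.erase M) ys hperm hpwa.1]

-- the count of Source B's pass ignores a trailing maximum while fewer b's than rest-elements remain
lemma altCount_concat : ∀ (bs ys : List Int) (M : Int) (ans : Int), bs.length ≤ ys.length →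
    (bs.foldl altStep (ys ++ [M], ans)).2 = (bs.foldl altStep (ys, ans)).2 := by
  intro bs
  induction bs with
  | nil => intro ys M ans _; simp
  | cons b bs ih =>
      intro ys M ans hlen
      cases ys with
      | nil => simp at hlen
      | cons y0 ys' =>
          simp only [List.foldl_cons, altStep, List.cons_append]
          by_cases hb : y0 ≤ b
          · simp only [if_pos hb]
            exact ih ys' M (ans + 1) (by simpa using Nat.le_of_succ_le_succ (by simpa using hlen))
          · simp only [if_neg hb]
            exact ih (y0 :: ys') M ans (by simp at hlen ⊢; omega)

-- the while-loop of A computes Source B's fold over the sorted lists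
lemma go_eq_sorted : ∀ (fuel : Nat) (A B : List Int) (ans : Int),
    A.length = fuel → A.length ≤ B.length →
    solutionGo fuel A B ans =
      (((PySem.List.sorted B (fun x => x)).take A.length).foldl altStep
        (PySem.List.sorted A (fun x => x), ans)).2 := by
  intro fuel
  induction fuel with
  | zero =>
      intro A B ans hA _
      rw [List.eq_nil_of_length_eq_zero hA]
      simp [solutionGo]
  | succ fuel ih =>
      intro A B ans hA hAB
      have hApos : 0 < A.length := by omega
      have hAne : A ≠ [] := by intro h; rw [h] at hApos; simp at hApos
      have hBne : B ≠ [] := by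
        intro h; rw [h] at hAB
        simp only [List.length_nil, Nat.le_zero] at hAB; omega
      obtain ⟨bm, hmb⟩ : ∃ bm, PySem.List.min? B (fun x : Int => x) = some bm := by
        cases h : PySem.List.min? B (fun x : Int => x) with
        | none => rw [PySem.List.min?_eq_none_iff] at h; exact absurd h hBne
        | some v => exact ⟨v, rfl⟩
      obtain ⟨am, hma⟩ : ∃ am, PySem.List.min? A (fun x : Int => x) = some am := by
        cases h : PySem.List.min? A (fun x : Int => x) with
        | none => rw [PySem.List.min?_eq_none_iff] at h; exact absurd h hAne
        | some v => exact ⟨v, rfl⟩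
      have hbmB : bm ∈ B := PySem.List.min?_mem hmb
      have hsB := sorted_min_cons B bm hmb
      have hremB : (PySem.List.remove? B bm).getD B = B.erase bm := by
        rw [PySem.List.remove?_eq_some_erase B bm hbmB]; rfl
      have hlenB : (B.erase bm).length = B.length - 1 := List.length_erase_of_mem hbmB
      simp only [solutionGo, if_pos hApos, hmb, hma]
      by_cases hcmp : bm < am
      · -- min(B) < min(A): discard max(A)
        obtain ⟨aM, hmaxA⟩ : ∃ aM, PySem.List.max? A (fun x : Int => x) = some aM := by
          cases h : PySem.List.max? A (fun x : Int => x) with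
          | none => rw [PySem.List.max?_eq_none_iff] at h; exact absurd h hAne
          | some v => exact ⟨v, rfl⟩
        have haMA : aM ∈ A := PySem.List.max?_mem hmaxA
        have hremA : (PySem.List.remove? A aM).getD A = A.erase aM := by
          rw [PySem.List.remove?_eq_some_erase A aM haMA]; rfl
        have hlenA : (A.erase aM).length = fuel := by
          rw [List.length_erase_of_mem haMA]; omega
        simp only [if_pos hcmp, hmaxA]
        rw [hremA, hremB, ih (A.erase aM) (B.erase bm) ans hlenA (by omega)]
        rw [hsB, hA, hlenA, List.take_succ_cons, List.foldl_cons]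
        have hsA := sorted_min_cons A am hma
        have hstep : altStep (PySem.List.sorted A (fun x => x), ans) bm
            = (PySem.List.sorted A (fun x => x), ans) := by
          rw [hsA]; simp [altStep]; omega
        rw [hstep, sorted_max_concat A aM hmaxA]
        exact (altCount_concat _ _ aM ans (by
          have := List.length_take_le fuel (PySem.List.sorted (B.erase bm) (fun x : Int => x))
          have hl : (PySem.List.sorted (A.erase aM) (fun x : Int => x)).length = fuel := by
            rw [PySem.List.length_sorted]; exact hlenA
          omega)).symm
      · -- min(B) ≥ min(A): match them
        have hamA : am ∈ A := PySem.List.min?_mem hma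
        have hremA : (PySem.List.remove? A am).getD A = A.erase am := by
          rw [PySem.List.remove?_eq_some_erase A am hamA]; rfl
        have hlenA : (A.erase am).length = fuel := by
          rw [List.length_erase_of_mem hamA]; omega
        rw [if_neg hcmp, hremA, hremB,
          ih (A.erase am) (B.erase bm) (ans + 1) hlenA (by omega)]
        rw [hsB, hA, hlenA, List.take_succ_cons, List.foldl_cons]
        have hsA := sorted_min_cons A am hma
        have hstep : altStep (PySem.List.sorted A (fun x => x), ans) bm
            = (PySem.List.sorted (A.erase am) (fun x => x), ans + 1) := by
          rw [hsA]; simp [altStep]; omega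
        rw [hstep]

-- ===== VERDICT (by name: the statement is the Claim_ definition above) =====
theorem solution_spec : Claim_equal_solution := by
  intro A B _ hpre
  unfold Spec_solution solution solution_alt
  rw [PySem.List.slice_to_natCast]
  exact go_eq_sorted A.length A B 0 rfl hpre
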